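-- pv_equiv track=rewrite | github.com/akshatshaw/agents | nl2sql_agent/app/utils.py | search_similar_examples
-- ===== SOURCE A (Python) =====
-- from typing import List, Dict, Any
--
-- def search_similar_examples(question: str, samples: List[Dict[str, str]], top_k: int = 3) -> List[Dict[str, str]]:
--     # Simplified implementation - just keyword matching
--     # In a real implementation, use embeddings and cosine similarity
--     results = []
--     keywords = question.lower().split()
--
--     for sample in samples:
--         score = sum(1 for keyword in keywords if keyword in sample["question"].lower())
--         if score > 0:
--             results.append({"sample": sample, "score": score})
--
--     # Sort by score and return top_k
--     results.sort(key=lambda x: x["score"], reverse=True)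
--     return [item["sample"] for item in results[:top_k]]
-- ===== SOURCE B (Python) =====
-- def search_similar_examples(question, samples, top_k=3):
--     # Bucket (counting) sort by score instead of a comparison sort.
--     keywords = question.lower().split()
--     if not keywords:
--         return []
--     buckets = [[] for _ in range(len(keywords) + 1)]
--     for sample in samples:
--         q = sample["question"].lower()
--         score = sum(1 for keyword in keywords if keyword in q)
--         if score != 0:
--             buckets[score].append(sample)
--     ordered = []
--     for s in range(len(keywords), 0, -1):
--         ordered.extend(buckets[s])
--     return ordered[:top_k]
-- ===== Notes on version B (the rewrite author's own statement) =====
-- stated objective: alternative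
-- what changed: Replaces collect-then-stable-comparison-sort with a bucket (counting) sort: qualifying samples are appended to score-indexed buckets in input order and the buckets are swept from the highest score down, preserving stable tie order without comparisons.
import Mathlib
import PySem

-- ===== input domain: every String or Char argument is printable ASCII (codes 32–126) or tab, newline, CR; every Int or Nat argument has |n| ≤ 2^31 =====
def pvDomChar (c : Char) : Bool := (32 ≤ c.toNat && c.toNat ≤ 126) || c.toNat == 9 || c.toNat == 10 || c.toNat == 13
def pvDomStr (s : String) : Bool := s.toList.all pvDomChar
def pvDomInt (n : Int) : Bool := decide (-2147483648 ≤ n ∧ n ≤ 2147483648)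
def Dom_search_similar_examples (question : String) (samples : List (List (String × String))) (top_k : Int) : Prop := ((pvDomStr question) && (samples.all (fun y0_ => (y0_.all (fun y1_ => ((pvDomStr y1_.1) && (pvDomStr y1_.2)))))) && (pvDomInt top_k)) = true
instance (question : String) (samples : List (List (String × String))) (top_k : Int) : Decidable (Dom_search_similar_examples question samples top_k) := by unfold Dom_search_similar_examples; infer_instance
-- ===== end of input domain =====

-- B replaces A's collect-then-stable-comparison-sort by a score-indexed bucket (counting) sort;
-- equal return values are proved on all inputs where every sample has a "question" key (else A raises KeyError).

-- ===== PORT A =====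
-- sample["question"] is a first-match association-list lookup; the .getD "" default is never
-- reached under Pre_ (A raises KeyError exactly when the key is missing, which Pre_ excludes).
def search_similar_examples (question : String) (samples : List (List (String × String))) (top_k : Int) : List (List (String × String)) :=
  let keywords := PySem.Str.split₀ (PySem.Str.lower question)
  let results : List ((List (String × String)) × Int) :=
    samples.foldl (fun results sample =>
      let score : Int := keywords.foldl (fun acc keyword =>
        if PySem.Str.isIn keyword (PySem.Str.lower ((List.lookup "question" sample).getD "")) then acc + 1 else acc) 0
      if score > 0 then results ++ [(sample, score)] else results) []
  let results := PySem.List.sorted results (fun x => x.2) true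
  (PySem.List.slice results none (some top_k)).map (fun item => item.1)

-- ===== PORT B =====
def search_similar_examples_alt (question : String) (samples : List (List (String × String))) (top_k : Int) : List (List (String × String)) :=
  let keywords := PySem.Str.split₀ (PySem.Str.lower question)
  if keywords = [] then [] else
  let buckets : List (List (List (String × String))) := List.replicate (keywords.length + 1) []
  let buckets := samples.foldl (fun buckets sample =>
    let q := PySem.Str.lower ((List.lookup "question" sample).getD "")
    let score : Nat := keywords.foldl (fun acc keyword =>
      if PySem.Str.isIn keyword q then acc + 1 else acc) 0
    if score ≠ 0 then buckets.set score (buckets.getD score [] ++ [sample]) else buckets) buckets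
  let ordered := (PySem.List.pyRange (keywords.length : Int) 0 (-1)).foldl
    (fun ordered s => ordered ++ buckets.getD s.toNat []) []
  PySem.List.slice ordered none (some top_k)

-- ===== PRECONDITION & SPEC =====
-- Pre_ excludes exactly the inputs with at least one keyword and a sample without a "question"
-- key: there both A and B raise KeyError (with no keywords the lookup is never evaluated).
def Pre_search_similar_examples (question : String) (samples : List (List (String × String))) (top_k : Int) : Prop :=
  PySem.Str.split₀ (PySem.Str.lower question) = [] ∨
    ∀ sample ∈ samples, (List.lookup "question" sample).isSome = true
instance (question : String) (samples : List (List (String × String))) (top_k : Int) : Decidable (Pre_search_similar_examples question samples top_k) := by unfold Pre_search_similar_examples; infer_instance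

def pvWitness_search_similar_examples : String × (List (List (String × String))) × Int :=
  ("select users", [[("question", "how to select users"), ("sql", "SELECT * FROM users")], [("question", "count rows")]], 3)

def Spec_search_similar_examples (question : String) (samples : List (List (String × String))) (top_k : Int) (out : List (List (String × String))) : Prop := out = search_similar_examples_alt question samples top_k
instance (question : String) (samples : List (List (String × String))) (top_k : Int) (out : List (List (String × String))) : Decidable (Spec_search_similar_examples question samples top_k out) := by unfold Spec_search_similar_examples; infer_instance

-- ===== CLAIM (what is proved, stated in full; the proofs are below) =====
def Claim_equal_search_similar_examples : Prop := ∀ (question : String) (samples : List (List (String × String))) (top_k : Int), Dom_search_similar_examples question samples top_k → Pre_search_similar_examples question samples top_k → Spec_search_similar_examples question samples top_k (search_similar_examples question samples top_k)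

-- ===== LEMMAS AND PROOFS =====

-- insertBy walks past a block of elements it does not go before
theorem insertBy_skip {α : Type} (before : α → α → Bool) (x : α) (g rest : List α)
    (h : ∀ y ∈ g, before x y = false) :
    PySem.List.insertBy before x (g ++ rest) = g ++ PySem.List.insertBy before x rest := by
  induction g with
  | nil => simp
  | cons y ys ih =>
    have hy : before x y = false := h y (by simp)
    simp [PySem.List.insertBy, hy, ih (fun z hz => h z (by simp [hz]))]

-- insertBy goes in front of a list all of whose elements it goes before
theorem insertBy_front {α : Type} (before : α → α → Bool) (x : α) (ys : List α)
    (h : ∀ y ∈ ys, before x y = true) :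
    PySem.List.insertBy before x ys = x :: ys := by
  cases ys with
  | nil => simp [PySem.List.insertBy]
  | cons y t => simp [PySem.List.insertBy, h y (by simp)]

theorem mem_flatMap_filter_key {α : Type} (key : α → Int) (ss : List Int) (l : List α)
    (y : α) (h : y ∈ ss.flatMap (fun s => l.filter (fun z => key z = s))) :
    key y ∈ ss := by
  rcases List.mem_flatMap.1 h with ⟨s, hs, hy⟩
  have hk : key y = s := by simpa using (List.mem_filter.1 hy).2
  simpa [hk] using hs

-- stable reverse-sort insertion step commutes with the score-group decomposition
theorem insertBy_flatMap {α : Type} (key : α → Int) (ss : List Int)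
    (hss : ss.Pairwise (· > ·)) (x : α) (hx : key x ∈ ss) (l : List α) :
    PySem.List.insertBy (fun a b => decide (key b < key a)) x
        (ss.flatMap (fun s => l.filter (fun z => key z = s)))
      = ss.flatMap (fun s => (l ++ [x]).filter (fun z => key z = s)) := by
  induction ss with
  | nil => simp at hx
  | cons s ss' ih =>
    have hgt : ∀ s' ∈ ss', s > s' := fun s' h => (List.pairwise_cons.1 hss).1 s' h
    have hp : ss'.Pairwise (· > ·) := (List.pairwise_cons.1 hss).2
    simp only [List.flatMap_cons]
    by_cases hxs : key x = s
    · have hskip : ∀ y ∈ l.filter (fun z => key z = s), (fun a b => decide (key b < key a)) x y = false := by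
        intro y hy
        have hk : key y = s := by simpa using (List.mem_filter.1 hy).2
        simp [hk, hxs]
      rw [insertBy_skip _ _ _ _ hskip]
      have hfront : ∀ y ∈ ss'.flatMap (fun s => l.filter (fun z => key z = s)),
          (fun a b => decide (key b < key a)) x y = true := by
        intro y hy
        have hk : key y ∈ ss' := mem_flatMap_filter_key key ss' l y hy
        have : key y < key x := by rw [hxs]; exact hgt _ hk
        simpa using this
      rw [insertBy_front _ _ _ hfront]
      have htail : ss'.flatMap (fun s => (l ++ [x]).filter (fun z => key z = s))
          = ss'.flatMap (fun s => l.filter (fun z => key z = s)) := by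
        apply List.flatMap_congr
        intro s' hs'
        have hne : key x ≠ s' := by
          have := hgt s' hs'; omega
        simp [List.filter_append, hne]
      rw [htail]
      simp [List.filter_append, hxs]
    · have hxss' : key x ∈ ss' := by
        rcases hx with _ | h
        · exact absurd rfl hxs
        · assumption
      have hlt : key x < s := hgt _ hxss'
      have hskip : ∀ y ∈ l.filter (fun z => key z = s), (fun a b => decide (key b < key a)) x y = false := by
        intro y hy
        have hk : key y = s := by simpa using (List.mem_filter.1 hy).2
        simp [hk]; omega
      rw [insertBy_skip _ _ _ _ hskip, ih hp hxss']
      simp [List.filter_append, hxs]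

-- the stable descending sort is the concatenation of the score groups, highest first
theorem sorted_rev_eq_flatMap_filter {α : Type} (key : α → Int) (ss : List Int)
    (hss : ss.Pairwise (· > ·)) (l : List α) (hl : ∀ x ∈ l, key x ∈ ss) :
    PySem.List.sorted l key true = ss.flatMap (fun s => l.filter (fun z => key z = s)) := by
  rw [PySem.List.sorted_rev_eq_foldl_insertBy]
  induction l using List.reverseRecOn with
  | nil => simp
  | append_singleton l x ih =>
    rw [List.foldl_append]
    simp only [List.foldl_cons, List.foldl_nil]
    rw [ih (fun y hy => hl y (by simp [hy]))]
    exact insertBy_flatMap key ss hss x (hl x (by simp)) l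

-- the countdown range K..1 is strictly descending
theorem pyRange_countdown_pairwise (a : Int) :
    (PySem.List.pyRange a 0 (-1)).Pairwise (· > ·) := by
  rw [PySem.List.pyRange_neg_one_eq_reverse]
  rw [List.pairwise_reverse]
  exact PySem.List.pairwise_lt_pyRange_one 1 (a + 1)

-- Nat-accumulator and Int-accumulator score loops agree
theorem score_cast (keywords : List String) (p : String → Bool) :
    ∀ (n : Nat),
      keywords.foldl (fun acc kw => if p kw then acc + 1 else acc) (n : Int)
        = ((keywords.foldl (fun acc kw => if p kw then acc + 1 else acc) n : Nat) : Int) := by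
  induction keywords with
  | nil => intro n; simp
  | cons kw t ih =>
    intro n
    by_cases h : p kw = true
    · simpa [h] using ih (n + 1)
    · have hf : p kw = false := by simpa using h
      simpa [hf] using ih n

-- the score loop is bounded by the number of keywords
theorem score_le (keywords : List String) (p : String → Bool) :
    ∀ (n : Nat),
      keywords.foldl (fun acc kw => if p kw then acc + 1 else acc) n ≤ n + keywords.length := by
  induction keywords with
  | nil => intro n; simp
  | cons kw t ih =>
    intro n
    by_cases h : p kw = true
    · have := ih (n + 1); simp [h]; omega
    · have := ih n; simp [h]; omega

-- the joint loop invariant: buckets are exactly the score groups of A's results, in order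
theorem buckets_invariant {α : Type} (K : Nat) (scoreN : α → Nat)
    (samples : List α) :
    ∀ (results : List (α × Int)) (buckets : List (List α)),
      buckets.length = K + 1 →
      (∀ s : Nat, s ≤ K → buckets.getD s [] = (results.filter (fun x => x.2 = (s : Int))).map (·.1)) →
      (∀ a ∈ samples, scoreN a ≤ K) →
      let results' := samples.foldl (fun res a =>
        if ((scoreN a : Int) > 0) then res ++ [(a, (scoreN a : Int))] else res) results
      let buckets' := samples.foldl (fun bks a =>
        if scoreN a ≠ 0 then bks.set (scoreN a) (bks.getD (scoreN a) [] ++ [a]) else bks) buckets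
      buckets'.length = K + 1 ∧
      (∀ s : Nat, s ≤ K → buckets'.getD s [] = (results'.filter (fun x => x.2 = (s : Int))).map (·.1)) := by
  induction samples with
  | nil => intro results buckets hlen hinv _; exact ⟨hlen, hinv⟩
  | cons a t ih =>
    intro results buckets hlen hinv hbnd
    simp only [List.foldl_cons]
    by_cases h0 : scoreN a = 0
    · rw [if_neg (by simp [h0] : ¬ ((scoreN a : Int) > 0)), if_neg (by simp [h0] : ¬ (scoreN a ≠ 0))]
      exact ih results buckets hlen hinv (fun b hb => hbnd b (by simp [hb]))
    · have hA : ((scoreN a : Int) > 0) := by exact_mod_cast Nat.pos_of_ne_zero h0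
      rw [if_pos hA, if_pos h0]
      apply ih
      · simp [hlen]
      · intro s hs
        have hsa : scoreN a ≤ K := hbnd a (by simp)
        by_cases heq : s = scoreN a
        · rw [heq]
          have hlt : scoreN a < buckets.length := by omega
          rw [List.getD_eq_getElem?_getD, List.getElem?_set_self hlt, Option.getD_some]
          rw [hinv (scoreN a) (by omega)]
          simp [List.filter_append]
        · have hne : scoreN a ≠ s := fun hc => heq hc.symm
          rw [List.getD_eq_getElem?_getD, List.getElem?_set_ne hne]
          rw [← List.getD_eq_getElem?_getD, hinv s hs]
          have hni : ((scoreN a : Int) = (s : Int)) = False := by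
            simp only [eq_iff_iff, iff_false]
            exact_mod_cast hne
          simp [List.filter_append, hni]
      · exact fun b hb => hbnd b (by simp [hb])

-- slicing commutes with mapping (the prefix is cut by length only)
theorem slice_map {α β : Type} (f : α → β) (xs : List α) (t : Int) :
    (PySem.List.slice xs none (some t)).map f = PySem.List.slice (xs.map f) none (some t) := by
  simp [PySem.List.slice, List.map_take]

-- proof-only abbreviations for the shared keyword-match predicate and score loops
def pvP (sample : List (String × String)) (kw : String) : Bool :=
  PySem.Str.isIn kw (PySem.Str.lower ((List.lookup "question" sample).getD ""))

def pvScoreN (kws : List String) (sample : List (String × String)) : Nat :=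
  kws.foldl (fun acc kw => if pvP sample kw then acc + 1 else acc) 0

def pvScoreI (kws : List String) (sample : List (String × String)) : Int :=
  kws.foldl (fun acc kw => if pvP sample kw then acc + 1 else acc) 0

-- every pair A's loop collects carries a score in 1..K
theorem results_mem_bounds {α : Type} (K : Nat) (scoreN : α → Nat) (samples : List α) :
    ∀ (results : List (α × Int)), (∀ x ∈ results, 1 ≤ x.2 ∧ x.2 ≤ (K : Int)) →
    (∀ a ∈ samples, scoreN a ≤ K) →
    ∀ x ∈ samples.foldl (fun res a => if ((scoreN a : Int) > 0) then res ++ [(a, (scoreN a : Int))] else res) results,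
      1 ≤ x.2 ∧ x.2 ≤ (K : Int) := by
  induction samples with
  | nil => intro results h _ x hx; exact h x hx
  | cons a t ih =>
    intro results h hbnd
    simp only [List.foldl_cons]
    apply ih
    · intro x hx
      by_cases hp : ((scoreN a : Int) > 0)
      · rw [if_pos hp] at hx
        rcases List.mem_append.1 hx with hx | hx
        · exact h x hx
        · have hxa : x = (a, (scoreN a : Int)) := by simpa using hx
          subst hxa
          have hK : scoreN a ≤ K := hbnd a (by simp)
          refine ⟨by omega, ?_⟩
          show ((scoreN a : Int)) ≤ ((K : Nat) : Int)
          exact_mod_cast hK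
      · rw [if_neg hp] at hx; exact h x hx
    · exact fun b hb => hbnd b (by simp [hb])

-- with no keywords every score is 0, so A collects nothing
theorem results_nil_of_no_keywords (samples : List (List (String × String))) :
    samples.foldl (fun res a => if (pvScoreI [] a) > 0 then res ++ [(a, pvScoreI [] a)] else res)
      ([] : List ((List (String × String)) × Int)) = [] := by
  induction samples with
  | nil => rfl
  | cons a t ih => simpa [pvScoreI] using ih

-- the whole pipeline, phrased over an arbitrary keyword list
theorem main_eq (kws : List String) (samples : List (List (String × String))) (top_k : Int) :
    (PySem.List.slice (PySem.List.sorted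
        (samples.foldl (fun res a => if ((pvScoreN kws a : Int) > 0) then res ++ [(a, (pvScoreN kws a : Int))] else res) [])
        (fun x => x.2) true) none (some top_k)).map (fun item => item.1)
    = PySem.List.slice
        ((PySem.List.pyRange (kws.length : Int) 0 (-1)).foldl
          (fun ord s => ord ++ (samples.foldl
            (fun bks a => if pvScoreN kws a ≠ 0 then bks.set (pvScoreN kws a) (bks.getD (pvScoreN kws a) [] ++ [a]) else bks)
            (List.replicate (kws.length + 1) [])).getD s.toNat []) [])
        none (some top_k) := by
  have hbnd : ∀ a ∈ samples, pvScoreN kws a ≤ kws.length := fun a _ => by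
    simpa [pvScoreN] using score_le kws (pvP a) 0
  obtain ⟨hlen', hinv'⟩ := buckets_invariant kws.length (pvScoreN kws) samples []
    (List.replicate (kws.length + 1) [])
    (by simp)
    (fun s hs => by
      rw [List.getD_eq_getElem?_getD, List.getElem?_replicate]
      simp [Nat.lt_succ_of_le hs])
    hbnd
  have hmem := results_mem_bounds kws.length (pvScoreN kws) samples [] (by simp) hbnd
  have hsorted := sorted_rev_eq_flatMap_filter (fun x => x.2)
    (PySem.List.pyRange (kws.length : Int) 0 (-1))
    (pyRange_countdown_pairwise _)
    (samples.foldl (fun res a => if ((pvScoreN kws a : Int) > 0) then res ++ [(a, (pvScoreN kws a : Int))] else res) [])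
    (fun x hx => by
      rw [PySem.List.mem_pyRange_neg_one]
      have := hmem x hx
      show 0 < x.2 ∧ x.2 ≤ ((kws.length : Nat) : Int)
      omega)
  have hord : (PySem.List.pyRange (kws.length : Int) 0 (-1)).foldl
      (fun ord s => ord ++ (samples.foldl
        (fun bks a => if pvScoreN kws a ≠ 0 then bks.set (pvScoreN kws a) (bks.getD (pvScoreN kws a) [] ++ [a]) else bks)
        (List.replicate (kws.length + 1) [])).getD s.toNat []) []
      = (PySem.List.pyRange (kws.length : Int) 0 (-1)).flatMap
        (fun s => ((samples.foldl (fun res a => if ((pvScoreN kws a : Int) > 0) then res ++ [(a, (pvScoreN kws a : Int))] else res) []).filter (fun z => z.2 = s)).map (fun x => x.1)) := by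
    rw [PySem.List.foldl_congr_mem _ _
      (fun ord s => ord ++ ((samples.foldl (fun res a => if ((pvScoreN kws a : Int) > 0) then res ++ [(a, (pvScoreN kws a : Int))] else res) []).filter (fun z => z.2 = s)).map (fun x => x.1)) _
      ?_]
    · simpa using PySem.List.foldl_append_eq_flatMap
        (fun s => ((samples.foldl (fun res a => if ((pvScoreN kws a : Int) > 0) then res ++ [(a, (pvScoreN kws a : Int))] else res) []).filter (fun z => z.2 = s)).map (fun x => x.1))
        (PySem.List.pyRange (kws.length : Int) 0 (-1)) []
    · intro acc s hs
      rw [PySem.List.mem_pyRange_neg_one] at hs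
      have h1 : s.toNat ≤ kws.length := by omega
      have h2 : ((s.toNat : Nat) : Int) = s := Int.toNat_of_nonneg (by omega)
      rw [hinv' s.toNat h1, h2]
  rw [hsorted, hord, slice_map, List.map_flatMap]

-- ===== VERDICT (by name: the statement is the Claim_ definition above) =====
theorem search_similar_examples_spec : Claim_equal_search_similar_examples := by
  intro question samples top_k _ _
  show (PySem.List.slice (PySem.List.sorted
        (samples.foldl (fun res a => if (pvScoreI (PySem.Str.split₀ (PySem.Str.lower question)) a) > 0 then res ++ [(a, pvScoreI (PySem.Str.split₀ (PySem.Str.lower question)) a)] else res) [])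
        (fun x => x.2) true) none (some top_k)).map (fun item => item.1)
      = (if PySem.Str.split₀ (PySem.Str.lower question) = [] then [] else PySem.List.slice
        ((PySem.List.pyRange ((PySem.Str.split₀ (PySem.Str.lower question)).length : Int) 0 (-1)).foldl
          (fun ord s => ord ++ (samples.foldl
            (fun bks a => if pvScoreN (PySem.Str.split₀ (PySem.Str.lower question)) a ≠ 0 then bks.set (pvScoreN (PySem.Str.split₀ (PySem.Str.lower question)) a) (bks.getD (pvScoreN (PySem.Str.split₀ (PySem.Str.lower question)) a) [] ++ [a]) else bks)
            (List.replicate ((PySem.Str.split₀ (PySem.Str.lower question)).length + 1) [])).getD s.toNat []) [])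
        none (some top_k))
  generalize PySem.Str.split₀ (PySem.Str.lower question) = kws
  by_cases hk : kws = []
  · subst hk
    rw [if_pos rfl, results_nil_of_no_keywords samples]
    simp [PySem.List.slice, PySem.List.sorted]
  rw [if_neg hk]
  have hstep : samples.foldl (fun res a => if (pvScoreI kws a) > 0 then res ++ [(a, pvScoreI kws a)] else res) ([] : List ((List (String × String)) × Int))
      = samples.foldl (fun res a => if ((pvScoreN kws a : Int) > 0) then res ++ [(a, (pvScoreN kws a : Int))] else res) [] := by
    apply PySem.List.foldl_congr_mem
    intro acc x hx
    have h := score_cast kws (pvP x) 0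
    norm_num at h
    simp only [pvScoreI, pvScoreN, h]
  rw [hstep]
  exact main_eq kws samples top_k
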